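-- pv_equiv track=rewrite | github.com/canalqb/teoremas | Teorema_MayerVietoris/mvtabela_gerador.py | gerar_tabela_mayer_vietoris
-- ===== SOURCE A (Python) =====
-- def gerar_tabela_mayer_vietoris(n_max):
--     tabela = []
--     acumulado = 1  # valor inicial
--
--     for n in range(n_max + 1):
--         inicio = 2 ** n
--         fim = 2 ** (n + 1) - 1
--
--         if n == 0:
--             estimado = 1
--         else:
--             # estratégia de acúmulo: duplica e soma anterior
--             estimado = acumulado + inicio - 1  # simula o crescimento
--
--         acumulado = estimado  # acumula para próxima iteração
--
--         tabela.append((n, inicio, estimado, fim))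
--
--     return tabela
-- ===== SOURCE B (Python) =====
-- def gerar_tabela_mayer_vietoris(n_max):
--     # closed form per row: no running accumulator, no n == 0 special case
--     return [(n, 2 ** n, 2 ** (n + 1) - 1 - n, 2 ** (n + 1) - 1)
--             for n in range(n_max + 1)]
-- ===== Notes on version B (the rewrite author's own statement) =====
-- stated objective: simpler
-- what changed: Replaces the accumulator recurrence (acumulado threaded across iterations, with an n==0 special case) by a stateless comprehension computing each row's estimate from the closed form 2**(n+1)-1-n.
import Mathlib
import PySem

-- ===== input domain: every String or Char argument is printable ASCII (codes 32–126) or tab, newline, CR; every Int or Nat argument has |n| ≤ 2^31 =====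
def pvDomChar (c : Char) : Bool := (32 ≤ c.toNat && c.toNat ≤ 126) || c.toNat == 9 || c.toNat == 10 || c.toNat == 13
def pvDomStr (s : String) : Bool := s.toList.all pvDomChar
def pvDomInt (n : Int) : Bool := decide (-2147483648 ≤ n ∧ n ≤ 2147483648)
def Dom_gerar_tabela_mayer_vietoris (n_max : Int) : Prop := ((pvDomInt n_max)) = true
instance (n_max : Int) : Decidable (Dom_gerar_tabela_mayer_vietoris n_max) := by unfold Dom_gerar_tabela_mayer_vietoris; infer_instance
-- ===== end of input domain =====

-- B drops A's threaded accumulator and n==0 branch, computing each row by the closed form 2^(n+1)-1-n (objective: simpler).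

-- ===== PORT A =====
def gerar_tabela_mayer_vietoris (n_max : Int) : List (Int × Int × Int × Int) :=
  ((PySem.List.pyRange 0 (n_max + 1) 1).foldl
    (fun (st : List (Int × Int × Int × Int) × Int) n =>
      let inicio : Int := 2 ^ n.toNat
      let fim : Int := 2 ^ (n.toNat + 1) - 1
      let estimado : Int := if n = 0 then 1 else st.2 + inicio - 1
      (st.1 ++ [(n, inicio, estimado, fim)], estimado))
    ([], 1)).1

-- ===== PORT B =====
def gerar_tabela_mayer_vietoris_alt (n_max : Int) : List (Int × Int × Int × Int) :=
  (PySem.List.pyRange 0 (n_max + 1) 1).map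
    (fun n => (n, 2 ^ n.toNat, 2 ^ (n.toNat + 1) - 1 - n, 2 ^ (n.toNat + 1) - 1))

-- ===== PRECONDITION & SPEC =====
def Spec_gerar_tabela_mayer_vietoris (n_max : Int) (out : List (Int × Int × Int × Int)) : Prop := out = gerar_tabela_mayer_vietoris_alt n_max
instance (n_max : Int) (out : List (Int × Int × Int × Int)) : Decidable (Spec_gerar_tabela_mayer_vietoris n_max out) := by unfold Spec_gerar_tabela_mayer_vietoris; infer_instance

-- ===== CLAIM (what is proved, stated in full; the proofs are below) =====
def Claim_equal_gerar_tabela_mayer_vietoris : Prop := ∀ (n_max : Int), Dom_gerar_tabela_mayer_vietoris n_max → Spec_gerar_tabela_mayer_vietoris n_max (gerar_tabela_mayer_vietoris n_max)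

-- ===== LEMMAS AND PROOFS =====

-- loop invariant: after m iterations, the table is the closed-form rows and the accumulator is 2^m - m
theorem mv_loop_key (m : Nat) :
    ((List.range m).map (fun k : Nat => ((0:Int) + k))).foldl
      (fun (st : List (Int × Int × Int × Int) × Int) n =>
        let inicio : Int := 2 ^ n.toNat
        let fim : Int := 2 ^ (n.toNat + 1) - 1
        let estimado : Int := if n = 0 then 1 else st.2 + inicio - 1
        (st.1 ++ [(n, inicio, estimado, fim)], estimado))
      ([], 1)
    = (((List.range m).map (fun k : Nat => ((0:Int) + k))).map
        (fun n : Int => ((n, 2 ^ n.toNat, 2 ^ (n.toNat + 1) - 1 - n, 2 ^ (n.toNat + 1) - 1) : Int × Int × Int × Int)),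
       ((2 ^ m - m : Int))) := by
  induction m with
  | zero => simp
  | succ m ih =>
    rw [List.range_succ, List.map_append, List.foldl_append, ih]
    simp only [List.map_cons, List.map_nil, List.foldl_cons, List.foldl_nil, List.map_append]
    cases m with
    | zero => norm_num
    | succ m =>
      have h0 : ((0:Int) + (m + 1 : Nat)) ≠ 0 := by push_cast; omega
      simp only [if_neg h0]
      have ht : ((0:Int) + (m + 1 : Nat)).toNat = m + 1 := by push_cast; omega
      rw [ht]
      simp only [Prod.mk.injEq, List.append_cancel_left_eq, List.cons.injEq, and_true, true_and]
      push_cast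
      refine ⟨?_, ?_⟩ <;> ring

-- ===== VERDICT (by name: the statement is the Claim_ definition above) =====
theorem gerar_tabela_mayer_vietoris_spec : Claim_equal_gerar_tabela_mayer_vietoris := by
  intro n_max _
  unfold Spec_gerar_tabela_mayer_vietoris gerar_tabela_mayer_vietoris gerar_tabela_mayer_vietoris_alt
  rw [PySem.List.pyRange_one]
  simp only [sub_zero] at *
  rw [mv_loop_key]
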